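-- pv_equiv track=rewrite | github.com/Jakub21/SnakeTheGame | stg_fnct_pack_00.py | add_perimeter0
-- ===== SOURCE A (Python) =====
-- def add_perimeter0(map_table, map_size, width, chr_wall):
-- 	for incr_f0 in range(map_size):
-- 		if incr_f0 < width:
-- 			map_table[incr_f0] = chr_wall
-- 		elif incr_f0 %width == 0:
-- 			map_table[incr_f0] = chr_wall
-- 		elif incr_f0 %width == width-1:
-- 			map_table[incr_f0] = chr_wall
-- 		elif incr_f0 > map_size -width:
-- 			map_table[incr_f0] = chr_wall
-- 	return map_table
-- ===== SOURCE B (Python) =====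
-- def add_perimeter0(map_table, map_size, width, chr_wall):
--     for i in range(min(width, map_size)):            # top row
--         map_table[i] = chr_wall
--     for i in range(0, map_size, width):              # left column
--         map_table[i] = chr_wall
--     for i in range(width - 1, map_size, width):      # right column
--         map_table[i] = chr_wall
--     for i in range(max(map_size - width + 1, 0), map_size):  # bottom row
--         map_table[i] = chr_wall
--     return map_table
-- ===== Notes on version B (the rewrite author's own statement) =====
-- stated objective: alternative
-- what changed: Instead of scanning every cell and testing four perimeter conditions, B enumerates the perimeter index families directly (top row, strided left/right columns, bottom row); Pre_ restricts to the natural domain of a positive cell width (and indices in range), since a grid with non-positive width is meaningless and A's marking there is an accident of the % tests.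
-- outside the precondition, e.g. on add_perimeter0([], 0, 0, '#'): A returns [], B raises ValueError
import Mathlib
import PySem

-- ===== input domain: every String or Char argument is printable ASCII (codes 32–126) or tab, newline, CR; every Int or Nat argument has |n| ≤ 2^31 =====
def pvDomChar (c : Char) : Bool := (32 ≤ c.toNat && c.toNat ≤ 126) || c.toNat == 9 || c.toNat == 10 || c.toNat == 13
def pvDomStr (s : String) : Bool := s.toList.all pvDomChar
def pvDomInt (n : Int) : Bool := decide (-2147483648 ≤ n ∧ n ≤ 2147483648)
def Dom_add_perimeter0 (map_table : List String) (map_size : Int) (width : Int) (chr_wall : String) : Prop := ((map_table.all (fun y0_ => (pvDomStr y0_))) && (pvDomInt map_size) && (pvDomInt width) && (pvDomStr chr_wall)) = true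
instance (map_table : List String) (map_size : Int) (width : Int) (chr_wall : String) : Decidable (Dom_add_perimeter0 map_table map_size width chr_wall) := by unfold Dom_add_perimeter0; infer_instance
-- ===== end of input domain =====

-- B enumerates only the perimeter indices (top row, strided left/right columns, bottom row)
-- instead of scanning every cell; A also mutates its argument in place in Python — the
-- equivalence proved here is about the RETURN value only.

-- ===== PORT A =====
def add_perimeter0 (map_table : List String) (map_size : Int) (width : Int) (chr_wall : String) : List String :=
  (PySem.List.pyRange 0 map_size 1).foldl (fun acc incr_f0 =>
    if incr_f0 < width then PySem.List.pySetD acc incr_f0 chr_wall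
    else if PySem.Int.mod incr_f0 width = 0 then PySem.List.pySetD acc incr_f0 chr_wall
    else if PySem.Int.mod incr_f0 width = width - 1 then PySem.List.pySetD acc incr_f0 chr_wall
    else if incr_f0 > map_size - width then PySem.List.pySetD acc incr_f0 chr_wall
    else acc) map_table

-- ===== PORT B =====
def add_perimeter0_alt (map_table : List String) (map_size : Int) (width : Int) (chr_wall : String) : List String :=
  let t1 := (PySem.List.pyRange 0 (min width map_size) 1).foldl
    (fun acc i => PySem.List.pySetD acc i chr_wall) map_table
  let t2 := (PySem.List.pyRange 0 map_size width).foldl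
    (fun acc i => PySem.List.pySetD acc i chr_wall) t1
  let t3 := (PySem.List.pyRange (width - 1) map_size width).foldl
    (fun acc i => PySem.List.pySetD acc i chr_wall) t2
  (PySem.List.pyRange (max (map_size - width + 1) 0) map_size 1).foldl
    (fun acc i => PySem.List.pySetD acc i chr_wall) t3

-- ===== PRECONDITION & SPEC =====
-- Pre_ restricts to the task's natural domain: a positive cell width (a grid with
-- width ≤ 0 is meaningless — A raises ZeroDivisionError for width = 0 with positive
-- map_size, and for negative width its marking pattern is an accident of the % tests)
-- and, when map_size is positive, indices in range (else A raises IndexError).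
def Pre_add_perimeter0 (map_table : List String) (map_size : Int) (width : Int) (chr_wall : String) : Prop :=
  0 < width ∧ (0 < map_size → map_size ≤ (map_table.length : Int))
instance (map_table : List String) (map_size : Int) (width : Int) (chr_wall : String) : Decidable (Pre_add_perimeter0 map_table map_size width chr_wall) := by unfold Pre_add_perimeter0; infer_instance

def pvWitness_add_perimeter0 : List String × Int × Int × String :=
  ([".", ".", ".", ".", ".", "."], 6, 3, "#")

def Spec_add_perimeter0 (map_table : List String) (map_size : Int) (width : Int) (chr_wall : String) (out : List String) : Prop := out = add_perimeter0_alt map_table map_size width chr_wall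
instance (map_table : List String) (map_size : Int) (width : Int) (chr_wall : String) (out : List String) : Decidable (Spec_add_perimeter0 map_table map_size width chr_wall out) := by unfold Spec_add_perimeter0; infer_instance

-- ===== CLAIM (what is proved, stated in full; the proofs are below) =====
def Claim_equal_add_perimeter0 : Prop := ∀ (map_table : List String) (map_size : Int) (width : Int) (chr_wall : String), Dom_add_perimeter0 map_table map_size width chr_wall → Pre_add_perimeter0 map_table map_size width chr_wall → Spec_add_perimeter0 map_table map_size width chr_wall (add_perimeter0 map_table map_size width chr_wall)

-- ===== LEMMAS AND PROOFS =====

-- a fold that writes the same value at a list of nonnegative indices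
def pvSetAll (xs : List String) (v : String) (L : List Int) : List String :=
  L.foldl (fun acc i => PySem.List.pySetD acc i v) xs

lemma length_pvSetAll (xs : List String) (v : String) (L : List Int) :
    (pvSetAll xs v L).length = xs.length := by
  induction L generalizing xs with
  | nil => rfl
  | cons i L ih => simp [pvSetAll, List.foldl_cons] at ih ⊢
                   rw [ih, PySem.List.length_pySetD]

lemma getElem?_pvSetAll (L : List Int) (hL : ∀ i ∈ L, 0 ≤ i) (xs : List String) (v : String)
    (j : Nat) (hj : j < xs.length) :
    (pvSetAll xs v L)[j]? = some (if (j : Int) ∈ L then v else xs[j]) := by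
  induction L generalizing xs with
  | nil => simp [pvSetAll, List.getElem?_eq_getElem hj]
  | cons i L ih =>
    have hi : 0 ≤ i := hL i (by simp)
    have hL' : ∀ k ∈ L, 0 ≤ k := fun k hk => hL k (by simp [hk])
    have hstep : pvSetAll xs v (i :: L) = pvSetAll (xs.set i.toNat v) v L := by
      simp [pvSetAll, List.foldl_cons, PySem.List.pySetD_of_nonneg xs v hi]
    have hj' : j < (xs.set i.toNat v).length := by simpa using hj
    rw [hstep, ih hL' (xs.set i.toNat v) hj']
    by_cases hmem : (j : Int) ∈ L
    · simp [hmem]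
    · by_cases hji : (j : Int) = i
      · have : i.toNat = j := by omega
        simp [hji, this]
      · have : i.toNat ≠ j := by omega
        simp [hmem, hji, List.getElem_set, this]

-- A's marking condition as a Bool test
def pvCondA (map_size width i : Int) : Bool :=
  decide (i < width) || decide (PySem.Int.mod i width = 0) ||
  decide (PySem.Int.mod i width = width - 1) || decide (i > map_size - width)

lemma A_eq_setAll (mt : List String) (ms w : Int) (cw : String) :
    add_perimeter0 mt ms w cw
      = pvSetAll mt cw (((PySem.List.pyRange 0 ms 1).filter (pvCondA ms w))) := by
  unfold add_perimeter0 pvSetAll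
  rw [PySem.List.foldl_congr_mem _ _
      (fun acc i => if pvCondA ms w i then PySem.List.pySetD acc i cw else acc) _
      (by intro acc i _
          unfold pvCondA
          by_cases h1 : i < w <;> by_cases h2 : PySem.Int.mod i w = 0 <;>
            by_cases h3 : PySem.Int.mod i w = w - 1 <;> by_cases h4 : i > ms - w <;>
            simp [h1, h2, h3, h4])]
  rw [PySem.List.foldl_if_eq_foldl_filter]

lemma B_eq_setAll (mt : List String) (ms w : Int) (cw : String) :
    add_perimeter0_alt mt ms w cw
      = pvSetAll mt cw
          (PySem.List.pyRange 0 (min w ms) 1 ++ PySem.List.pyRange 0 ms w ++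
           PySem.List.pyRange (w - 1) ms w ++
           PySem.List.pyRange (max (ms - w + 1) 0) ms 1) := by
  unfold add_perimeter0_alt pvSetAll
  simp [List.foldl_append]

-- mod characterization of the right column
lemma mod_eq_sub_one_iff (j w : Int) (hw : 0 < w) :
    PySem.Int.mod j w = w - 1 ↔ w ∣ (j - (w - 1)) := by
  constructor
  · intro h
    refine ⟨PySem.Int.floordiv j w, ?_⟩
    have h2 := PySem.Int.floordiv_mul_add_mod j w
    rw [h] at h2
    linarith [mul_comm (PySem.Int.floordiv j w) w]
  · rintro ⟨k, hk⟩
    have hj : j = k * w + (w - 1) := by linarith [mul_comm w k]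
    rw [PySem.Int.mod_eq_emod_of_pos hw, hj,
        show k * w + (w - 1) = (w - 1) + w * k by ring, Int.add_mul_emod_self_left]
    exact Int.emod_eq_of_lt (by omega) (by omega)

-- the sets of indices the two programs write coincide (positive width)
lemma mark_iff (ms w j : Int) (hpos : 0 < w) (hj : 0 ≤ j) :
    (j ∈ (PySem.List.pyRange 0 ms 1).filter (pvCondA ms w))
      ↔ j ∈ PySem.List.pyRange 0 (min w ms) 1 ++ PySem.List.pyRange 0 ms w ++
            PySem.List.pyRange (w - 1) ms w ++
            PySem.List.pyRange (max (ms - w + 1) 0) ms 1 := by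
  rw [List.mem_filter, PySem.List.mem_pyRange_one]
  unfold pvCondA
  simp only [List.mem_append, PySem.List.mem_pyRange_one,
    PySem.List.mem_pyRange_iff_of_pos hpos]
  constructor
  · rintro ⟨⟨h0, hms⟩, hc⟩
    simp only [Bool.or_eq_true, decide_eq_true_eq] at hc
    rcases hc with ((h | h) | h) | h
    · exact Or.inl (Or.inl (Or.inl ⟨h0, by omega⟩))
    · exact Or.inl (Or.inl (Or.inr ⟨h0, hms, by
        simpa using (PySem.Int.mod_eq_zero_iff_dvd j w).mp h⟩))
    · rcases (mod_eq_sub_one_iff j w hpos).mp h with ⟨k, hk⟩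
      have hk0 : 0 ≤ k := by nlinarith
      have : w - 1 ≤ j := by nlinarith
      exact Or.inl (Or.inr ⟨this, hms, ⟨k, hk⟩⟩)
    · exact Or.inr ⟨by omega, hms⟩
  · rintro (((⟨h0, hlt⟩ | ⟨h0, hms, hdvd⟩) | ⟨hge, hms, hdvd⟩) | ⟨hge, hms⟩) <;>
      refine ⟨⟨by omega, by omega⟩, ?_⟩ <;>
      simp only [Bool.or_eq_true, decide_eq_true_eq]
    · exact Or.inl (Or.inl (Or.inl (by omega)))
    · exact Or.inl (Or.inl (Or.inr ((PySem.Int.mod_eq_zero_iff_dvd j w).mpr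
        (by simpa using hdvd))))
    · exact Or.inl (Or.inr ((mod_eq_sub_one_iff j w hpos).mpr hdvd))
    · exact Or.inr (by omega)

lemma nonneg_of_mem_A (ms w : Int) :
    ∀ i ∈ (PySem.List.pyRange 0 ms 1).filter (pvCondA ms w), 0 ≤ i := by
  intro i hi
  rw [List.mem_filter, PySem.List.mem_pyRange_one] at hi
  exact hi.1.1

-- ===== VERDICT (by name: the statement is the Claim_ definition above) =====
theorem add_perimeter0_spec : Claim_equal_add_perimeter0 := by
  intro mt ms w cw _ hpre
  obtain ⟨hpos, hlen⟩ := hpre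
  unfold Spec_add_perimeter0
  by_cases hms : 0 < ms
  · rw [A_eq_setAll, B_eq_setAll]
    apply List.ext_getElem?
    intro j
    by_cases hj : j < mt.length
    · rw [getElem?_pvSetAll _ (nonneg_of_mem_A ms w) mt cw j hj,
          getElem?_pvSetAll _ (by intro i hi
                                  simp only [List.mem_append, PySem.List.mem_pyRange_one,
                                    PySem.List.mem_pyRange_iff_of_pos hpos] at hi
                                  rcases hi with ((h | h) | h) | h <;> omega) mt cw j hj]
      simp only [mark_iff ms w j hpos (by omega)]
    · rw [List.getElem?_eq_none (by rw [length_pvSetAll]; omega),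
          List.getElem?_eq_none (by rw [length_pvSetAll]; omega)]
  · -- map_size ≤ 0: both programs leave the table unchanged
    have hA : add_perimeter0 mt ms w cw = mt := by
      unfold add_perimeter0
      rw [PySem.List.pyRange_one_eq_nil (by omega)]
      rfl
    have hB : add_perimeter0_alt mt ms w cw = mt := by
      unfold add_perimeter0_alt
      rw [PySem.List.pyRange_one_eq_nil (by omega)]
      have h2 : PySem.List.pyRange 0 ms w = [] := by
        have := PySem.List.mem_pyRange_iff_of_pos hpos (a := 0) (b := ms)
        rcases h : PySem.List.pyRange 0 ms w with _ | ⟨x, t⟩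
        · rfl
        · exfalso
          have hx := (this x).mp (by rw [h]; simp)
          omega
      have h3 : PySem.List.pyRange (w - 1) ms w = [] := by
        have := PySem.List.mem_pyRange_iff_of_pos hpos (a := w - 1) (b := ms)
        rcases h : PySem.List.pyRange (w - 1) ms w with _ | ⟨x, t⟩
        · rfl
        · exfalso
          have hx := (this x).mp (by rw [h]; simp)
          omega
      rw [h2, h3, PySem.List.pyRange_one_eq_nil (by omega)]
      rfl
    rw [hA, hB]
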